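-- pv_equiv track=rewrite | github.com/gelios02/AI_English_App | AI_center.py | parse_weekly_plan
-- ===== SOURCE A (Python) =====
-- def parse_weekly_plan(text):
--     cards = {}
--     current_day = None
--     current_advice = []
--     card_number = 1
--     for line in text.split('\n'):
--         # Проверяем, является ли строка заголовком нового дня
--         if line.startswith("Day"):
--             # Если это новый день, сохраняем предыдущий
--             if current_day is not None:
--                 # Добавляем текущую карту в словарь карт
--                 cards[f"Card {card_number}"] = {"number_day": current_day, "advice": '\n'.join(current_advice)}
--                 card_number += 1
--                 current_advice = []  # Очищаем рекомендации для нового дня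
--             # Извлекаем номер дня
--             current_day = line.strip()
--         # Проверяем, является ли строка частью рекомендаций для текущего дня
--         elif current_day is not None:
--             # Иначе добавляем текст в рекомендации для текущего дня
--             current_advice.append(line.strip())
--     # Сохраняем последний день
--     if current_day is not None:
--         # Добавляем последнюю карту в словарь карт
--         cards[f"Card {card_number}"] = {"number_day": current_day, "advice": '\n'.join(current_advice)}
--     return cards
-- ===== SOURCE B (Python) =====
-- def parse_weekly_plan(text):
--     # Right-to-left pass: walking the lines in reverse, each advice block is
--     # already complete when its Day header is reached, so a section is emitted
--     # exactly once and no duplicated end-of-loop flush is needed.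
--     sections = []
--     advice = []
--     for line in reversed(text.split('\n')):
--         if line.startswith("Day"):
--             sections.append((line.strip(), advice))
--             advice = []
--         else:
--             advice = [line.strip()] + advice
--     sections.reverse()
--     return {f"Card {n}": {"number_day": day, "advice": '\n'.join(adv)}
--             for n, (day, adv) in enumerate(sections, 1)}
-- ===== Notes on version B (the rewrite author's own statement) =====
-- stated objective: alternative
-- what changed: B traverses the lines in REVERSE order, so each advice block is complete when its Day header is reached and a section is emitted exactly once, eliminating A's current_day/card_number state machine and its duplicated final-flush block; the cards are then produced by one comprehension over the re-reversed sections.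
import Mathlib
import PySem

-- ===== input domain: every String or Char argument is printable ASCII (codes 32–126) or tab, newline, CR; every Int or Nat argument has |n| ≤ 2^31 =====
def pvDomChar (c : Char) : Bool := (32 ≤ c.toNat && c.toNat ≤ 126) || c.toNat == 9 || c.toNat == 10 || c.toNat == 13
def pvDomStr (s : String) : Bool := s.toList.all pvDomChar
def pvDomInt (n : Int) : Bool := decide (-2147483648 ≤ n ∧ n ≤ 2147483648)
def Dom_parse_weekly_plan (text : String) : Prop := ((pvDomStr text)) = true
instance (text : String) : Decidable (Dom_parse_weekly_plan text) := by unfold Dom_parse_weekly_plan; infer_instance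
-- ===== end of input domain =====

-- B walks the lines in reverse so each section is emitted exactly once, replacing A's
-- forward state machine with its duplicated final flush (objective: alternative); same return value.

-- ===== PORT A =====
-- loop state: (cards, current_day, current_advice, card_number)
def pwpStateA : Type := PySem.Dict String (List (String × String)) × Option String × List String × Int

def pwpCard (d : String) (adv : List String) : List (String × String) :=
  [("number_day", d), ("advice", PySem.Str.join "\n" adv)]

def pwpStepA (st : pwpStateA) (line : String) : pwpStateA :=
  match st with
  | (cards, day, adv, k) =>
    if PySem.Str.startswith line "Day" then
      match day with
      | some d =>
          (cards.insert ("Card " ++ PySem.Int.toStr k) (pwpCard d adv),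
           some (PySem.Str.strip line), [], k + 1)
      | none => (cards, some (PySem.Str.strip line), adv, k)
    else
      match day with
      | some d => (cards, some d, adv ++ [PySem.Str.strip line], k)
      | none => (cards, none, adv, k)

-- the trailing "if current_day is not None: … ; return cards" block
def pwpFinishA (st : pwpStateA) : List (String × List (String × String)) :=
  match st with
  | (cards, some d, adv, k) =>
      (cards.insert ("Card " ++ PySem.Int.toStr k) (pwpCard d adv)).items
  | (cards, none, _, _) => cards.items

def parse_weekly_plan (text : String) : List (String × List (String × String)) :=
  pwpFinishA (((PySem.Str.split? text "\n").getD []).foldl pwpStepA (PySem.Dict.empty, none, [], 1))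

-- ===== PORT B =====
-- one step of B's loop over reversed(lines); state = (sections, advice)
def pwpStepB (st : List (String × List String) × List String) (line : String) :
    List (String × List String) × List String :=
  if PySem.Str.startswith line "Day" then
    (st.1 ++ [(PySem.Str.strip line, st.2)], [])
  else
    (st.1, [PySem.Str.strip line] ++ st.2)

-- the final dict comprehension over enumerate(sections, 1)
def pwpRender (sections : List (String × List String)) : List (String × List (String × String)) :=
  (PySem.List.enumerate sections 1).map
    (fun p => ("Card " ++ PySem.Int.toStr p.1,
               [("number_day", p.2.1), ("advice", PySem.Str.join "\n" p.2.2)]))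

def parse_weekly_plan_alt (text : String) : List (String × List (String × String)) :=
  let lines := (PySem.Str.split? text "\n").getD []
  let st := lines.reverse.foldl pwpStepB ([], [])
  pwpRender st.1.reverse

-- ===== PRECONDITION & SPEC =====
def Spec_parse_weekly_plan (text : String) (out : List (String × List (String × String))) : Prop := out = parse_weekly_plan_alt text
instance (text : String) (out : List (String × List (String × String))) : Decidable (Spec_parse_weekly_plan text out) := by unfold Spec_parse_weekly_plan; infer_instance

-- ===== CLAIM (what is proved, stated in full; the proofs are below) =====
def Claim_equal_parse_weekly_plan : Prop := ∀ (text : String), Dom_parse_weekly_plan text → Spec_parse_weekly_plan text (parse_weekly_plan text)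

-- ===== LEMMAS AND PROOFS =====

-- canonical sectioning of a line list (proof-side common reference point)
def pwpCanon : List String → List (String × List String)
  | [] => []
  | l :: ls =>
    if PySem.Str.startswith l "Day" then
      (PySem.Str.strip l,
       (ls.takeWhile (fun x => !PySem.Str.startswith x "Day")).map PySem.Str.strip)
        :: pwpCanon (ls.dropWhile (fun x => !PySem.Str.startswith x "Day"))
    else pwpCanon ls
termination_by l => l.length
decreasing_by
  · exact Nat.lt_succ_of_le (List.length_dropWhile_le _ _)
  · exact Nat.lt_succ_self _

-- str(n) is injective on positive integers (via Nat.digits)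
theorem pwp_toDigitsCore_append (b : Nat) : ∀ (f n : Nat) (ds : List Char),
    Nat.toDigitsCore b f n ds = Nat.toDigitsCore b f n [] ++ ds := by
  intro f
  induction f with
  | zero => intro n ds; simp [Nat.toDigitsCore]
  | succ f ih =>
    intro n ds
    simp only [Nat.toDigitsCore]
    split
    · simp
    · rw [ih (n / b) [(n % b).digitChar], ih (n / b) ((n % b).digitChar :: ds)]
      simp

theorem pwp_toDigitsCore_eq_digits : ∀ (n f : Nat), 0 < n → n ≤ f →
    Nat.toDigitsCore 10 f n [] = ((Nat.digits 10 n).map Nat.digitChar).reverse := by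
  intro n
  induction n using Nat.strong_induction_on with
  | _ n ih =>
    intro f hn hf
    cases f with
    | zero => exact absurd hf (by omega)
    | succ f =>
      simp only [Nat.toDigitsCore]
      rw [Nat.digits_def' (by norm_num : (1:Nat) < 10) hn]
      by_cases h : n / 10 = 0
      · simp [h, Nat.digits_zero]
      · have h0 : 0 < n / 10 := Nat.pos_of_ne_zero h
        have hlt : n / 10 < n := Nat.div_lt_self hn (by norm_num)
        rw [if_neg h, pwp_toDigitsCore_append, ih (n / 10) hlt f h0 (by omega)]
        simp

theorem pwp_digitChar_inj {a b : Nat} (ha : a < 10) (hb : b < 10)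
    (h : Nat.digitChar a = Nat.digitChar b) : a = b := by
  interval_cases a <;> interval_cases b <;> simp_all [Nat.digitChar]

theorem pwp_map_digitChar_inj : ∀ (l1 l2 : List Nat), (∀ x ∈ l1, x < 10) → (∀ x ∈ l2, x < 10) →
    l1.map Nat.digitChar = l2.map Nat.digitChar → l1 = l2 := by
  intro l1
  induction l1 with
  | nil => intro l2 _ _ h; cases l2 <;> simp_all
  | cons a l1 ih =>
    intro l2 h1 h2 h
    cases l2 with
    | nil => simp_all
    | cons b l2 =>
      simp only [List.map_cons, List.cons.injEq] at h
      have := pwp_digitChar_inj (h1 a (by simp)) (h2 b (by simp)) h.1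
      have := ih l2 (fun x hx => h1 x (by simp [hx])) (fun x hx => h2 x (by simp [hx])) h.2
      simp_all

theorem pwp_toDigits_inj {m n : Nat} (hm : 0 < m) (hn : 0 < n)
    (h : Nat.toDigits 10 m = Nat.toDigits 10 n) : m = n := by
  unfold Nat.toDigits at h
  rw [pwp_toDigitsCore_eq_digits m (m + 1) hm (by omega),
      pwp_toDigitsCore_eq_digits n (n + 1) hn (by omega)] at h
  have h2 := List.reverse_injective h
  have h3 := pwp_map_digitChar_inj _ _
    (fun x hx => Nat.digits_lt_base (by norm_num) hx)
    (fun x hx => Nat.digits_lt_base (by norm_num) hx) h2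
  have := congrArg (Nat.ofDigits 10) h3
  rwa [Nat.ofDigits_digits, Nat.ofDigits_digits] at this

theorem pwp_key_inj {m n : Nat} (hm : 0 < m) (hn : 0 < n)
    (h : ("Card " ++ PySem.Int.toStr (m : Int)) = ("Card " ++ PySem.Int.toStr (n : Int))) : m = n := by
  have h1 : PySem.Int.toStr (m : Int) = PySem.Int.toStr (n : Int) := by
    have := congrArg String.toList h
    simp only [String.toList_append] at this
    exact String.toList_inj.mp (List.append_cancel_left this)
  unfold PySem.Int.toStr PySem.Int.toChars at h1
  rw [if_neg (by omega), if_neg (by omega)] at h1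
  have h2 := String.toList_inj.mpr h1
  simp only [String.toList_ofList] at h2
  have h3 : Nat.toDigits 10 m = Nat.toDigits 10 n := by
    simpa using h2
  exact pwp_toDigits_inj hm hn h3

-- rendering appends one card for one appended section
theorem pwp_render_append (pre : List (String × List String)) (d : String) (adv : List String) :
    pwpRender (pre ++ [(d, adv)]) = pwpRender pre ++
      [("Card " ++ PySem.Int.toStr ((pre.length : Int) + 1),
        [("number_day", d), ("advice", PySem.Str.join "\n" adv)])] := by
  unfold pwpRender
  rw [PySem.List.enumerate_append, List.map_append]
  simp [PySem.List.enumerate_cons, PySem.List.enumerate_nil, add_comm]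

-- the next card key is fresh in the rendered prefix
theorem pwp_fresh (pre : List (String × List String)) :
    (PySem.Dict.mk (pwpRender pre)).contains
      ("Card " ++ PySem.Int.toStr ((pre.length : Int) + 1)) = false := by
  rw [PySem.Dict.contains_mk, List.any_eq_false]
  intro p hp
  unfold pwpRender at hp
  rw [List.mem_map] at hp
  obtain ⟨q, hq, rfl⟩ := hp
  rw [PySem.List.mem_enumerate_iff] at hq
  obtain ⟨k, hk, rfl⟩ := hq
  intro hcontra
  have hcontra := eq_of_beq hcontra
  have c1 : ((1 : Int) + (k : Nat)) = ((k + 1 : Nat) : Int) := by push_cast; ring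
  have c2 : ((pre.length : Int) + 1) = ((pre.length + 1 : Nat) : Int) := by push_cast; ring
  rw [c1, c2] at hcontra
  have := pwp_key_inj (m := k + 1) (n := pre.length + 1) (by omega) (by omega) hcontra
  omega

theorem pwp_insert_render (pre : List (String × List String)) (d : String) (adv : List String) :
    (PySem.Dict.mk (pwpRender pre)).insert
        ("Card " ++ PySem.Int.toStr ((pre.length : Int) + 1)) (pwpCard d adv)
      = PySem.Dict.mk (pwpRender (pre ++ [(d, adv)])) := by
  apply PySem.Dict.ext
  rw [PySem.Dict.items_insert_of_not_contains _ _ (pwp_fresh pre)]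
  rw [pwp_render_append]
  rfl

-- unfolding lemmas for pwpCanon (well-founded recursion: cite the equations once)
theorem pwp_canon_cons_day {l : String} (ls : List String)
    (h : PySem.Str.startswith l "Day" = true) :
    pwpCanon (l :: ls) =
      (PySem.Str.strip l,
       (ls.takeWhile (fun x => !PySem.Str.startswith x "Day")).map PySem.Str.strip)
        :: pwpCanon (ls.dropWhile (fun x => !PySem.Str.startswith x "Day")) := by
  rw [pwpCanon, if_pos h]

theorem pwp_canon_cons_other {l : String} (ls : List String)
    (h : PySem.Str.startswith l "Day" = false) :
    pwpCanon (l :: ls) = pwpCanon ls := by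
  rw [pwpCanon, if_neg (by rw [h]; exact Bool.false_ne_true)]

theorem pwp_take_cons_day {l : String} (ls : List String)
    (h : PySem.Str.startswith l "Day" = true) :
    (l :: ls).takeWhile (fun x => !PySem.Str.startswith x "Day") = [] := by
  simp only [List.takeWhile_cons, h, Bool.not_true, Bool.false_eq_true, if_false]

theorem pwp_take_cons_other {l : String} (ls : List String)
    (h : PySem.Str.startswith l "Day" = false) :
    (l :: ls).takeWhile (fun x => !PySem.Str.startswith x "Day")
      = l :: ls.takeWhile (fun x => !PySem.Str.startswith x "Day") := by
  simp only [List.takeWhile_cons, h, Bool.not_false, if_true]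

theorem pwp_drop_cons_day {l : String} (ls : List String)
    (h : PySem.Str.startswith l "Day" = true) :
    (l :: ls).dropWhile (fun x => !PySem.Str.startswith x "Day") = l :: ls := by
  simp only [List.dropWhile_cons, h, Bool.not_true, Bool.false_eq_true, if_false]

theorem pwp_drop_cons_other {l : String} (ls : List String)
    (h : PySem.Str.startswith l "Day" = false) :
    (l :: ls).dropWhile (fun x => !PySem.Str.startswith x "Day")
      = ls.dropWhile (fun x => !PySem.Str.startswith x "Day") := by
  simp only [List.dropWhile_cons, h, Bool.not_false, if_true]

-- A-side invariant: the running fold equals the rendered sections seen so far plus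
-- the canonical sectioning of the remaining lines
theorem pwp_main_some : ∀ (lines : List String) (pre : List (String × List String)) (d : String) (adv : List String),
    pwpFinishA (lines.foldl pwpStepA (PySem.Dict.mk (pwpRender pre), some d, adv, (pre.length : Int) + 1))
      = pwpRender (pre
          ++ [(d, adv ++ (lines.takeWhile (fun x => !PySem.Str.startswith x "Day")).map PySem.Str.strip)]
          ++ pwpCanon (lines.dropWhile (fun x => !PySem.Str.startswith x "Day"))) := by
  intro lines
  induction lines with
  | nil =>
    intro pre d adv
    simp only [List.foldl_nil, pwpFinishA, List.takeWhile_nil, List.dropWhile_nil,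
      List.map_nil, List.append_nil, pwpCanon]
    rw [pwp_insert_render]
  | cons line lines ih =>
    intro pre d adv
    rw [List.foldl_cons]
    by_cases h : PySem.Str.startswith line "Day" = true
    · have step : pwpStepA (PySem.Dict.mk (pwpRender pre), some d, adv, (pre.length : Int) + 1) line
        = ((PySem.Dict.mk (pwpRender pre)).insert
              ("Card " ++ PySem.Int.toStr ((pre.length : Int) + 1)) (pwpCard d adv),
           some (PySem.Str.strip line), [], (pre.length : Int) + 1 + 1) := by
        simp only [pwpStepA, h, if_true]
      rw [step, pwp_insert_render]
      have hk : (pre.length : Int) + 1 + 1 = (((pre ++ [(d, adv)]).length : Int)) + 1 := by simp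
      rw [hk, ih (pre ++ [(d, adv)]) (PySem.Str.strip line) []]
      rw [pwp_take_cons_day lines h, pwp_drop_cons_day lines h, pwp_canon_cons_day lines h]
      simp
    · have hf : PySem.Str.startswith line "Day" = false := Bool.eq_false_iff.mpr h
      have step : pwpStepA (PySem.Dict.mk (pwpRender pre), some d, adv, (pre.length : Int) + 1) line
        = (PySem.Dict.mk (pwpRender pre), some d, adv ++ [PySem.Str.strip line],
           (pre.length : Int) + 1) := by
        simp only [pwpStepA, hf, Bool.false_eq_true, if_false]
      rw [step, ih pre d (adv ++ [PySem.Str.strip line])]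
      rw [pwp_take_cons_other lines hf, pwp_drop_cons_other lines hf]
      simp

theorem pwp_main_none : ∀ (lines : List String),
    pwpFinishA (lines.foldl pwpStepA (PySem.Dict.mk [], none, [], 1))
      = pwpRender (pwpCanon lines) := by
  intro lines
  induction lines with
  | nil => rw [pwpCanon]; rfl
  | cons line lines ih =>
    rw [List.foldl_cons]
    by_cases h : PySem.Str.startswith line "Day" = true
    · have step : pwpStepA (PySem.Dict.mk [], none, [], 1) line
        = (PySem.Dict.mk [], some (PySem.Str.strip line), [], 1) := by
        simp only [pwpStepA, h, if_true]
      rw [step]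
      have hmain := pwp_main_some lines [] (PySem.Str.strip line) []
      have h0 : pwpRender ([] : List (String × List String)) = [] := rfl
      rw [h0] at hmain
      have h1 : (([] : List (String × List String)).length : Int) + 1 = 1 := by simp
      rw [h1] at hmain
      rw [hmain, pwp_canon_cons_day lines h]
      simp
    · have hf : PySem.Str.startswith line "Day" = false := Bool.eq_false_iff.mpr h
      have step : pwpStepA (PySem.Dict.mk [], none, [], 1) line
        = (PySem.Dict.mk [], none, [], 1) := by
        simp only [pwpStepA, hf, Bool.false_eq_true, if_false]
      rw [step, ih, pwp_canon_cons_other lines hf]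

-- dropping the non-Day prefix does not change the canonical sectioning
theorem pwp_canon_dropWhile : ∀ (ls : List String),
    pwpCanon (ls.dropWhile (fun x => !PySem.Str.startswith x "Day")) = pwpCanon ls := by
  intro ls
  induction ls with
  | nil => rfl
  | cons x xs ih =>
    by_cases h : PySem.Str.startswith x "Day" = true
    · rw [pwp_drop_cons_day xs h]
    · have hf : PySem.Str.startswith x "Day" = false := Bool.eq_false_iff.mpr h
      rw [pwp_drop_cons_other xs hf, ih, pwp_canon_cons_other xs hf]

-- B-side: the reverse fold computes the canonical sectioning
theorem pwp_foldB_char : ∀ (lines : List String),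
    (lines.foldr (fun x y => pwpStepB y x) ([], [])).1.reverse = pwpCanon lines ∧
    (lines.foldr (fun x y => pwpStepB y x) ([], [])).2
      = (lines.takeWhile (fun x => !PySem.Str.startswith x "Day")).map PySem.Str.strip := by
  intro lines
  induction lines with
  | nil => exact ⟨by rw [pwpCanon]; rfl, rfl⟩
  | cons l ls ih =>
    obtain ⟨ih1, ih2⟩ := ih
    rw [List.foldr_cons]
    rcases hst : List.foldr (fun x y => pwpStepB y x) ([], []) ls with ⟨secs, adv⟩
    rw [hst] at ih1 ih2
    have ih1' : secs.reverse = pwpCanon ls := ih1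
    have ih2' : adv = (ls.takeWhile (fun x => !PySem.Str.startswith x "Day")).map PySem.Str.strip := ih2
    show (pwpStepB (secs, adv) l).1.reverse = _ ∧ (pwpStepB (secs, adv) l).2 = _
    by_cases h : PySem.Str.startswith l "Day" = true
    · have step : pwpStepB (secs, adv) l = (secs ++ [(PySem.Str.strip l, adv)], []) := by
        unfold pwpStepB; rw [if_pos h]
      rw [step, pwp_canon_cons_day ls h, pwp_take_cons_day ls h]
      constructor
      · rw [List.reverse_append, List.reverse_singleton, List.singleton_append, ih1', ih2',
          pwp_canon_dropWhile ls]
      · rfl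
    · have hf : PySem.Str.startswith l "Day" = false := Bool.eq_false_iff.mpr h
      have step : pwpStepB (secs, adv) l = (secs, [PySem.Str.strip l] ++ adv) := by
        unfold pwpStepB; rw [if_neg h]
      rw [step, pwp_canon_cons_other ls hf, pwp_take_cons_other ls hf]
      exact ⟨ih1', by rw [List.map_cons, ← ih2']; rfl⟩

-- ===== VERDICT (by name: the statement is the Claim_ definition above) =====
theorem parse_weekly_plan_spec : Claim_equal_parse_weekly_plan := by
  intro text _
  unfold Spec_parse_weekly_plan parse_weekly_plan parse_weekly_plan_alt
  show pwpFinishA (((PySem.Str.split? text "\n").getD []).foldl pwpStepA (PySem.Dict.mk [], none, [], 1))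
      = pwpRender ((((PySem.Str.split? text "\n").getD []).reverse.foldl pwpStepB ([], [])).1.reverse)
  rw [pwp_main_none, List.foldl_reverse, (pwp_foldB_char _).1]
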